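-- pv_equiv track=rewrite | github.com/EugenePustovit/CodeChallenges | Interview/the_most_repeated_character.py | the_most_repetition
-- ===== SOURCE A (Python) =====
-- def the_most_repetition(s: str) -> list[int]:
--     d = {}
--
--     for ch in s:
--         if d.get(ch):
--             d[ch] += 1
--         else:
--             d[ch] = 1
--
--     max1 = 0
--     max2 = 0
--     for rep in d.values():
--         if max1 < rep:
--             max2 = max1
--             max1 = rep
--         elif max2 < rep:
--             max2 = rep
--
--     return [max1, max2]
--
-- s = 'qwerty'
-- ===== SOURCE B (Python) =====
-- def the_most_repetition(s: str) -> list[int]: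
--     d = {}
--     for ch in s:
--         d[ch] = d.get(ch, 0) + 1
--     counts = sorted(d.values(), reverse=True)
--     return [counts[0] if counts else 0, counts[1] if len(counts) > 1 else 0]
-- ===== Notes on version B (the rewrite author's own statement) =====
-- stated objective: simpler
-- what changed: Replaces the two-variable single-pass top-two selection over the frequency dict's values with sorting the values in descending order and indexing the first two, padding with zeros.
import Mathlib
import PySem

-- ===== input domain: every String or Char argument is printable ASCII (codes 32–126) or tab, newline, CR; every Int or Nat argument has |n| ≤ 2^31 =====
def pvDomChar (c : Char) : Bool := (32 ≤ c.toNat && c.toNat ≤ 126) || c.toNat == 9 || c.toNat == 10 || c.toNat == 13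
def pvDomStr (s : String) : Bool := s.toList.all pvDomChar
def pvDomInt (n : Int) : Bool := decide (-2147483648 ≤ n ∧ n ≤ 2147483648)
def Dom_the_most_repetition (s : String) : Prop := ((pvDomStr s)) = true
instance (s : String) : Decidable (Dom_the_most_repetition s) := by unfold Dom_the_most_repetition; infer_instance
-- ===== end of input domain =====

-- B replaces A's two-variable single-pass top-two selection over the dict values by
-- sorting the values descending and reading the first two (padding with 0); same results, simpler code.

-- ===== PORT A =====
def the_most_repetition (s : String) : List Int :=
  let d : PySem.Dict Char Int := s.toList.foldl (fun d ch =>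
      match PySem.Dict.get? d ch with
      | some n => if n ≠ 0 then d.insert ch (n + 1) else d.insert ch 1
      | none => d.insert ch 1) PySem.Dict.empty
  let p := (PySem.Dict.values d).foldl (fun (p : Int × Int) rep =>
      if p.1 < rep then (rep, p.1)
      else if p.2 < rep then (p.1, rep)
      else p) (0, 0)
  [p.1, p.2]

-- ===== PORT B =====
def the_most_repetition_alt (s : String) : List Int :=
  let d : PySem.Dict Char Int := s.toList.foldl (fun d ch => d.insert ch (PySem.Dict.getD d ch 0 + 1)) PySem.Dict.empty
  let counts := PySem.List.sorted (PySem.Dict.values d) (fun x => x) true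
  [counts.headD 0, if counts.length > 1 then counts.getD 1 0 else 0]

-- ===== PRECONDITION & SPEC =====
def Spec_the_most_repetition (s : String) (out : List Int) : Prop := out = the_most_repetition_alt s
instance (s : String) (out : List Int) : Decidable (Spec_the_most_repetition s out) := by unfold Spec_the_most_repetition; infer_instance

-- ===== CLAIM (what is proved, stated in full; the proofs are below) =====
def Claim_equal_the_most_repetition : Prop := ∀ (s : String), Dom_the_most_repetition s → Spec_the_most_repetition s (the_most_repetition s)

-- ===== LEMMAS AND PROOFS =====

-- A's fold step over (max1, max2)
def pvStep (p : Int × Int) (x : Int) : Int × Int :=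
  if p.1 < x then (x, p.1) else if p.2 < x then (p.1, x) else p

-- descending insertion (proof-side model of the sorted list)
def pvIns (x : Int) : List Int → List Int
  | [] => [x]
  | a :: t => if x ≤ a then a :: pvIns x t else x :: a :: t

def pvSort (l : List Int) : List Int := l.foldr pvIns []

lemma pvIns_perm (x : Int) (u : List Int) : (pvIns x u).Perm (x :: u) := by
  induction u with
  | nil => simp [pvIns]
  | cons a t ih =>
      simp only [pvIns]
      split_ifs with h
      · exact ((ih.cons a).trans (List.Perm.swap x a t))
      · exact List.Perm.refl _

lemma mem_pvIns {y x : Int} {u : List Int} (h : y ∈ pvIns x u) : y = x ∨ y ∈ u := by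
  have := (pvIns_perm x u).mem_iff.mp h
  simpa using this

lemma pvIns_sorted (x : Int) {u : List Int} (h : u.Pairwise (fun a b => b ≤ a)) :
    (pvIns x u).Pairwise (fun a b => b ≤ a) := by
  induction u with
  | nil => simp [pvIns]
  | cons a t ih =>
      rcases List.pairwise_cons.mp h with ⟨ha, ht⟩
      simp only [pvIns]
      split_ifs with hxa
      · refine List.pairwise_cons.mpr ⟨?_, ih ht⟩
        intro y hy
        rcases mem_pvIns hy with rfl | hy
        · exact hxa
        · exact ha y hy
      · refine List.pairwise_cons.mpr ⟨?_, h⟩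
        intro y hy
        rcases List.mem_cons.mp hy with rfl | hy
        · omega
        · have := ha y hy; omega

lemma pvSort_perm (l : List Int) : (pvSort l).Perm l := by
  induction l with
  | nil => simp [pvSort]
  | cons a t ih => exact ((pvIns_perm a (pvSort t)).trans (ih.cons a))

lemma pvSort_sorted (l : List Int) : (pvSort l).Pairwise (fun a b => b ≤ a) := by
  induction l with
  | nil => simp [pvSort]
  | cons a t ih => exact pvIns_sorted a ih

-- a descending-sorted list is determined by its multiset
lemma pv_eq_of_perm_of_sorted {u v : List Int} (hp : u.Perm v)
    (hu : u.Pairwise (fun a b => b ≤ a)) (hv : v.Pairwise (fun a b => b ≤ a)) : u = v :=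
  List.Perm.eq_of_pairwise (fun _ _ _ _ h1 h2 => le_antisymm h2 h1) hu hv hp

-- the first two entries of the descending sort evolve by A's step (for nonnegative insertions)
lemma pvStep_pvIns (x : Int) (hx : 0 ≤ x) (u : List Int) :
    ((pvIns x u).headD 0, (pvIns x u).tail.headD 0) = pvStep (u.headD 0, u.tail.headD 0) x := by
  match u with
  | [] =>
      simp only [pvIns, pvStep, List.headD_nil, List.headD_cons, List.tail_cons]
      split_ifs
      all_goals simp_all
      all_goals omega
  | [a] =>
      simp only [pvIns, pvStep, List.headD_nil, List.headD_cons, List.tail_cons]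
      split_ifs <;> simp_all [List.headD, List.tail] <;> omega
  | a :: b :: r =>
      simp only [pvIns, pvStep, List.headD_cons, List.tail_cons]
      split_ifs <;> simp_all [List.headD, List.tail] <;> omega

lemma pv_foldr_step (l : List Int) (h : ∀ x ∈ l, (0:Int) ≤ x) :
    l.foldr (fun x p => pvStep p x) (0, 0) = ((pvSort l).headD 0, (pvSort l).tail.headD 0) := by
  induction l with
  | nil => simp [pvSort, pvStep]
  | cons a t ih =>
      have ha : (0:Int) ≤ a := h a (by simp)
      have ht : ∀ x ∈ t, (0:Int) ≤ x := fun x hx => h x (by simp [hx])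
      calc (a :: t).foldr (fun x p => pvStep p x) (0, 0)
          = pvStep (t.foldr (fun x p => pvStep p x) (0, 0)) a := rfl
        _ = pvStep ((pvSort t).headD 0, (pvSort t).tail.headD 0) a := by rw [ih ht]
        _ = ((pvIns a (pvSort t)).headD 0, (pvIns a (pvSort t)).tail.headD 0) :=
            (pvStep_pvIns a ha (pvSort t)).symm
        _ = ((pvSort (a :: t)).headD 0, (pvSort (a :: t)).tail.headD 0) := rfl

lemma pvSort_reverse (l : List Int) : pvSort l.reverse = pvSort l := by
  refine pv_eq_of_perm_of_sorted ?_ (pvSort_sorted _) (pvSort_sorted _)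
  exact ((pvSort_perm l.reverse).trans (List.reverse_perm l)).trans (pvSort_perm l).symm

-- A's foldl over any nonnegative list computes the first two entries of the descending sort
lemma pv_foldl_step (l : List Int) (h : ∀ x ∈ l, (0:Int) ≤ x) :
    l.foldl pvStep (0, 0) = ((pvSort l).headD 0, (pvSort l).tail.headD 0) := by
  have h' : ∀ x ∈ l.reverse, (0:Int) ≤ x := by simpa using h
  calc l.foldl pvStep (0, 0)
      = l.reverse.foldr (fun x p => pvStep p x) (0, 0) := by
        rw [List.foldl_eq_foldr_reverse]
    _ = ((pvSort l.reverse).headD 0, (pvSort l.reverse).tail.headD 0) := pv_foldr_step _ h'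
    _ = ((pvSort l).headD 0, (pvSort l).tail.headD 0) := by rw [pvSort_reverse]

-- PySem's descending sort (identity key) is pvSort
lemma pySorted_eq_pvSort (l : List Int) :
    PySem.List.sorted l (fun x => x) true = pvSort l := by
  refine pv_eq_of_perm_of_sorted ?_ ?_ (pvSort_sorted l)
  · exact (PySem.List.sorted_perm l (fun x => x) true).trans (pvSort_perm l).symm
  · exact PySem.List.sorted_pairwise_rev l (fun x => x)

-- B's second-entry expression is tail.headD 0
lemma pv_second (u : List Int) :
    (if u.length > 1 then u.getD 1 0 else 0) = u.tail.headD 0 := by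
  match u with
  | [] => simp
  | [a] => simp
  | a :: b :: r => simp

-- the two dict-building steps agree pointwise, so A's dict is the counter
lemma pv_dictA_eq_counter (cs : List Char) :
    cs.foldl (fun (d : PySem.Dict Char Int) ch =>
      match PySem.Dict.get? d ch with
      | some n => if n ≠ 0 then d.insert ch (n + 1) else d.insert ch 1
      | none => d.insert ch 1) PySem.Dict.empty
    = PySem.Dict.counter cs := by
  rw [← PySem.Dict.foldl_insert_getD_add_one_eq_counter]
  apply PySem.List.foldl_congr_mem
  intro d ch _
  rcases hg : PySem.Dict.get? d ch with _ | n
  · simp [PySem.Dict.getD_eq_get?_getD, hg]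
  · by_cases hn : n = 0
    · subst hn; simp [PySem.Dict.getD_eq_get?_getD, hg]
    · simp [PySem.Dict.getD_eq_get?_getD, hg, hn]

-- the counter's values are nonnegative
lemma pv_counter_values_nonneg (cs : List Char) :
    ∀ x ∈ PySem.Dict.values (PySem.Dict.counter cs), (0:Int) ≤ x := by
  intro x hx
  have : x ∈ (PySem.Dict.counter cs).items.map (·.2) := hx
  rw [PySem.Dict.items_counter] at this
  simp only [List.map_map, List.mem_map] at this
  rcases this with ⟨k, _, hk⟩
  simp only [Function.comp] at hk
  omega

-- ===== VERDICT (by name: the statement is the Claim_ definition above) =====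
theorem the_most_repetition_spec : Claim_equal_the_most_repetition := by
  intro s _
  show the_most_repetition s = the_most_repetition_alt s
  unfold the_most_repetition the_most_repetition_alt
  rw [pv_dictA_eq_counter, PySem.Dict.foldl_insert_getD_add_one_eq_counter]
  have hvals := pv_counter_values_nonneg s.toList
  have hfold :
      (PySem.Dict.values (PySem.Dict.counter s.toList)).foldl
        (fun (p : Int × Int) rep =>
          if p.1 < rep then (rep, p.1)
          else if p.2 < rep then (p.1, rep)
          else p) (0, 0)
      = (PySem.Dict.values (PySem.Dict.counter s.toList)).foldl pvStep (0, 0) := rfl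
  simp only [hfold, pv_foldl_step _ hvals, pySorted_eq_pvSort, pv_second]
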